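-- pv_equiv track=rewrite | github.com/MrBrantCode/unitest_baseline | mut_generate/mist_train_cf/cf_40235/solution.py | countTagOccurrences
-- ===== SOURCE A (Python) =====
-- def countTagOccurrences(html, tagName, attribute, value):
--     count = 0
--     tag_start = "<" + tagName
--     tag_end = "</" + tagName + ">"
--     index = 0
--     while index < len(html):
--         start = html.find(tag_start, index)
--         if start == -1:
--             break
--         end = html.find(">", start)
--         tag = html[start:end+1]
--         if attribute in tag and value in tag:
--             count += 1
--         index = end + 1
--     return count
-- ===== SOURCE B (Python) =====
-- def countTagOccurrences(html, tagName, attribute, value):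
--     # One pass: split on '>' once; every chunk before a '>' that contains the
--     # opening tag contributes exactly one tag (from its first occurrence to the '>').
--     open_tag = "<" + tagName
--     count = 0
--     for chunk in html.split(">")[:-1]:
--         i = chunk.find(open_tag)
--         if i != -1:
--             tag = chunk[i:] + ">"
--             if attribute in tag and value in tag:
--                 count += 1
--     return count
-- ===== Notes on version B (the rewrite author's own statement) =====
-- stated objective: alternative
-- what changed: A repeatedly calls html.find for the next '<'+tagName and jumps index past the closing '>'; B instead splits html on '>' once and counts, per chunk before a '>', the tag formed from the chunk's first occurrence of '<'+tagName.
-- outside the precondition, e.g. on countTagOccurrences('<a>>', 'a>', '', ''): A returns 1, B returns 0; on countTagOccurrences('<a', 'a', '', ''): A does not finish within the time limit, B returns 0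
import Mathlib
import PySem

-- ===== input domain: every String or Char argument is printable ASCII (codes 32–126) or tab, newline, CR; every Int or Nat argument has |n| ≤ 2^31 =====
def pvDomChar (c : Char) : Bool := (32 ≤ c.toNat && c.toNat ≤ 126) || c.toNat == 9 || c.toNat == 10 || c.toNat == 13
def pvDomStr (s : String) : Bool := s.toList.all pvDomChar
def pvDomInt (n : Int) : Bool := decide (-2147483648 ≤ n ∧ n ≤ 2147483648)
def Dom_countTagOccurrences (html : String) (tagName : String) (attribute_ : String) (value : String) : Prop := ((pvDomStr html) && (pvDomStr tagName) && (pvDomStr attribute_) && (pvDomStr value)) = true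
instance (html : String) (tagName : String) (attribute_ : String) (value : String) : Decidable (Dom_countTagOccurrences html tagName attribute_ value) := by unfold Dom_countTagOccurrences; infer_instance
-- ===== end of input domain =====

-- B replaces A's index-jumping find/while scan by one split of the html on '>' and a
-- per-chunk count (objective: alternative — same cost, different algorithm).

-- ===== PORT A =====
-- Python's `while index < len(html)` loops FOREVER when `html.find(">", start)` returns -1
-- (then index = end+1 = 0 restarts the scan). The loop is ported with fuel html.length + 1,
-- enough for every terminating run since each iteration strictly increases `index`;
-- the non-terminating inputs are excluded by Pre_countTagOccurrences.
def pvLoopA (html ts attr val : List Char) : Nat → Int → Int → Int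
  | 0, _, count => count
  | fuel + 1, index, count =>
    if index < (html.length : Int) then
      let start := PySem.Chars.findFrom html ts index
      if start = -1 then count
      else
        let e := PySem.Chars.findFrom html ['>'] start
        let tag := PySem.Chars.slice html (some start) (some (e + 1))
        pvLoopA html ts attr val fuel (e + 1)
          (if PySem.Chars.isIn attr tag && PySem.Chars.isIn val tag then count + 1 else count)
    else count

def countTagOccurrences (html : String) (tagName : String) (attribute_ : String) (value : String) : Int :=
  let tagStart := '<' :: tagName.toList
  let _tagEnd := '<' :: '/' :: (tagName.toList ++ ['>'])  -- tag_end: computed by A, never used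
  pvLoopA html.toList tagStart attribute_.toList value.toList (html.toList.length + 1) 0 0

-- ===== PORT B =====
-- Source B's loop body over the chunks of html.split(">")[:-1]
def pvChunkCount (ts attr val : List Char) (chunks : List (List Char)) : Int :=
  chunks.foldl (fun count chunk =>
    let i := PySem.Chars.find chunk ts
    if i = -1 then count
    else
      let tag := PySem.Chars.slice chunk (some i) none ++ ['>']
      if PySem.Chars.isIn attr tag && PySem.Chars.isIn val tag then count + 1 else count) 0

def countTagOccurrences_alt (html : String) (tagName : String) (attribute_ : String) (value : String) : Int :=
  let openTag := '<' :: tagName.toList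
  pvChunkCount openTag attribute_.toList value.toList
    (PySem.List.slice (PySem.Chars.splitOn html.toList ['>']) none (some (-1)))

-- ===== PRECONDITION & SPEC =====
-- Pre_ excludes (i) inputs whose tagName contains '>' AND whose html actually contains
-- '<'+tagName — such a tag name is outside the natural domain (a "tag" spanning a '>'), and
-- B's split-on-'>' scan cannot see such a match — and (ii) htmls in which some occurrence of
-- '<'+tagName has no later '>': Python A loops forever there.
def Pre_countTagOccurrences (html : String) (tagName : String) (attribute_ : String) (value : String) : Prop :=
  ¬ ('>' ∈ tagName.toList ∧ PySem.Chars.isIn ('<' :: tagName.toList) html.toList = true) ∧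
  ∀ j < html.toList.length, ('<' :: tagName.toList) <+: html.toList.drop j → '>' ∈ html.toList.drop j

instance (html : String) (tagName : String) (attribute_ : String) (value : String) : Decidable (Pre_countTagOccurrences html tagName attribute_ value) := by unfold Pre_countTagOccurrences; infer_instance

def pvWitness_countTagOccurrences : String × String × String × String :=
  ("<a x=\"1\">hi</a><b x=\"1\">", "a", "x", "1")

def Spec_countTagOccurrences (html : String) (tagName : String) (attribute_ : String) (value : String) (out : Int) : Prop := out = countTagOccurrences_alt html tagName attribute_ value
instance (html : String) (tagName : String) (attribute_ : String) (value : String) (out : Int) : Decidable (Spec_countTagOccurrences html tagName attribute_ value out) := by unfold Spec_countTagOccurrences; infer_instance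

-- ===== CLAIM (what is proved, stated in full; the proofs are below) =====
def Claim_equal_countTagOccurrences : Prop := ∀ (html : String) (tagName : String) (attribute_ : String) (value : String), Dom_countTagOccurrences html tagName attribute_ value → Pre_countTagOccurrences html tagName attribute_ value → Spec_countTagOccurrences html tagName attribute_ value (countTagOccurrences html tagName attribute_ value)

-- ===== LEMMAS AND PROOFS =====

-- clean cons-structural form of html.split(">")
def pvSplit1 : List Char → List (List Char)
  | [] => [[]]
  | c :: rest => if c = '>' then [] :: pvSplit1 rest else (pvSplit1 rest).modifyHead (c :: ·)

-- B's per-chunk contribution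
def pvScore (ts attr val : List Char) (chunk : List Char) : Int :=
  if PySem.Chars.find chunk ts = -1 then 0
  else if PySem.Chars.isIn attr (chunk.drop (PySem.Chars.find chunk ts).toNat ++ ['>']) &&
          PySem.Chars.isIn val (chunk.drop (PySem.Chars.find chunk ts).toNat ++ ['>']) then 1 else 0

-- B's value on a (suffix of the) input, in sum-of-scores form
def pvB (ts attr val : List Char) (s : List Char) : Int :=
  (((pvSplit1 s).dropLast).map (pvScore ts attr val)).sum

lemma pvSplit1_ne_nil (s : List Char) : pvSplit1 s ≠ [] := by
  induction s with
  | nil => simp [pvSplit1]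
  | cons c rest ih =>
    simp only [pvSplit1]
    split
    · simp
    · cases h : pvSplit1 rest with
      | nil => exact absurd h ih
      | cons a l => simp

lemma pvGo_eq : ∀ (fuel : Nat) (l cur : List Char) (acc : List (List Char)),
    l.length < fuel →
    PySem.Chars.splitOn.go ['>'] fuel l cur acc
      = acc.reverse ++ (pvSplit1 l).modifyHead (cur.reverse ++ ·) := by
  intro fuel
  induction fuel with
  | zero => intro l cur acc h; omega
  | succ fuel ih =>
    intro l cur acc h
    cases l with
    | nil => simp [PySem.Chars.splitOn.go, pvSplit1]
    | cons c rest =>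
      by_cases hc : c = '>'
      · subst hc
        have hpref : List.isPrefixOf ['>'] ('>' :: rest) = true := by
          simp [List.isPrefixOf]
        rw [PySem.Chars.splitOn.go, if_pos hpref]
        rw [ih _ _ _ (by simpa using h)]
        cases hr : pvSplit1 rest with
        | nil => exact absurd hr (pvSplit1_ne_nil rest)
        | cons a l => simp [pvSplit1, hr]
      · have hpref : List.isPrefixOf ['>'] (c :: rest) = false := by
          simp [List.isPrefixOf]
          exact fun h => absurd h.symm hc
        rw [PySem.Chars.splitOn.go, if_neg (by simp [hpref])]
        rw [ih _ _ _ (by simpa using h)]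
        cases hrest : pvSplit1 rest with
        | nil => exact absurd hrest (pvSplit1_ne_nil rest)
        | cons hd tl => simp [pvSplit1, hc, hrest]

lemma pvSplitOn_eq_split1 (s : List Char) : PySem.Chars.splitOn s ['>'] = pvSplit1 s := by
  rw [PySem.Chars.splitOn, pvGo_eq (s.length + 1) s [] [] (by omega)]
  cases hs : pvSplit1 s with
  | nil => exact absurd hs (pvSplit1_ne_nil s)
  | cons hd tl => simp

-- B's foldl is the sum of the per-chunk scores
lemma pvChunkCount_eq_sum (ts attr val : List Char) (chunks : List (List Char)) :
    pvChunkCount ts attr val chunks = (chunks.map (pvScore ts attr val)).sum := by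
  unfold pvChunkCount
  rw [PySem.List.foldl_congr_mem chunks _ (fun acc chunk => acc + pvScore ts attr val chunk) 0]
  · rw [PySem.List.foldl_add]; simp
  · intro acc chunk _
    simp only [pvScore]
    by_cases h : PySem.Chars.find chunk ts = -1
    · simp [h]
    · have h0 : 0 ≤ PySem.Chars.find chunk ts := by
        have := PySem.Chars.neg_one_le_find chunk ts; omega
      simp only [h, if_false, PySem.Chars.slice_eq_listSlice, PySem.List.slice_from _ h0]
      split <;> omega

-- the head of pvSplit1 is a prefix, every other member an infix, of the input
lemma pvSplit1_shape (s : List Char) :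
    ∃ h tl, pvSplit1 s = h :: tl ∧ h <+: s ∧ ∀ c ∈ tl, c <:+: s := by
  induction s with
  | nil => exact ⟨[], [], rfl, List.nil_prefix, by simp⟩
  | cons c rest ih =>
    obtain ⟨h, tl, heq, hpre, hinf⟩ := ih
    simp only [pvSplit1]
    by_cases hc : c = '>'
    · subst hc
      rw [if_pos rfl]
      refine ⟨[], pvSplit1 rest, rfl, List.nil_prefix, ?_⟩
      intro d hd
      rw [heq] at hd
      have hdr : d <:+: rest := by
        rcases List.mem_cons.mp hd with rfl | hm
        · exact hpre.isInfix
        · exact hinf d hm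
      exact hdr.trans (List.suffix_cons _ rest).isInfix
    · simp only [if_neg hc, heq, List.modifyHead_cons]
      refine ⟨c :: h, tl, rfl, List.cons_prefix_cons.mpr ⟨rfl, hpre⟩, ?_⟩
      intro d hd
      exact (hinf d hd).trans (List.suffix_cons c rest).isInfix

-- when '<'+tagName does not occur at all, A's loop stops on its first find
lemma pvLoopA_notin (html ts attr val : List Char) (h : ¬ ts <:+: html) :
    ∀ (fuel : Nat) (count : Int), pvLoopA html ts attr val fuel 0 count = count := by
  intro fuel count
  cases fuel with
  | zero => rfl
  | succ fuel =>
    rw [pvLoopA]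
    by_cases hl : (0 : Int) < (html.length : Int)
    · rw [if_pos hl]
      have h0 : PySem.Chars.findFrom html ts 0 = -1 := by
        rw [PySem.Chars.findFrom_zero]
        exact (PySem.Chars.find_eq_neg_one_iff _ _).mpr h
      simp [h0]
    · rw [if_neg hl]

lemma pvB_eq_zero (ts attr val s : List Char) (h : ¬ ts <:+: s) : pvB ts attr val s = 0 := by
  unfold pvB
  apply List.sum_eq_zero
  intro x hx
  simp only [List.mem_map] at hx
  obtain ⟨chunk, hc, rfl⟩ := hx
  have hinfix : chunk <:+: s := by
    obtain ⟨hd, tl, heq, hpre, hinf⟩ := pvSplit1_shape s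
    have hc' : chunk ∈ pvSplit1 s := List.mem_of_mem_dropLast hc
    rw [heq] at hc'
    rcases List.mem_cons.mp hc' with rfl | hm
    · exact hpre.isInfix
    · exact hinf _ hm
  have hnot : ¬ ts <:+: chunk := fun hts => h (hts.trans hinfix)
  simp [pvScore, (PySem.Chars.find_eq_neg_one_iff chunk ts).mpr hnot]

-- peeling the first chunk at the first '>'
lemma pvSplit1_decomp : ∀ (g : Nat) (s : List Char), ['>'] <+: s.drop g →
    (∀ i < g, ¬ ['>'] <+: s.drop i) →
    pvSplit1 s = s.take g :: pvSplit1 (s.drop (g + 1)) := by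
  intro g
  induction g with
  | zero =>
    intro s h0 _
    rw [List.drop_zero] at h0
    obtain ⟨t, ht⟩ := h0
    rw [← ht]
    simp [pvSplit1]
  | succ g ih =>
    intro s hg hmin
    cases s with
    | nil => simp at hg
    | cons c rest =>
      have hc : c ≠ '>' := by
        intro hc
        subst hc
        exact hmin 0 (Nat.succ_pos g) (by simp)
      rw [List.drop_succ_cons] at hg
      have hmin' : ∀ i < g, ¬ ['>'] <+: rest.drop i := by
        intro i hi
        have := hmin (i + 1) (by omega)
        rwa [List.drop_succ_cons] at this
      simp only [pvSplit1, if_neg hc, ih rest hg hmin', List.modifyHead_cons]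
      simp

-- the main combinatorial step: B's sum over chunks peels exactly A's next tag
lemma pvChunk_step (ts attr val : List Char) (hne : ts ≠ []) (hgt : '>' ∉ ts) :
    ∀ (n : Nat) (u : List Char), u.length ≤ n → ∀ (F G : Nat),
    ts <+: u.drop F → (∀ i < F, ¬ ts <+: u.drop i) →
    ['>'] <+: (u.drop F).drop G → (∀ i < G, ¬ ['>'] <+: (u.drop F).drop i) →
    pvB ts attr val u =
      (if PySem.Chars.isIn attr ((u.drop F).take G ++ ['>']) &&
          PySem.Chars.isIn val ((u.drop F).take G ++ ['>']) then 1 else 0) +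
      pvB ts attr val (u.drop (F + G + 1)) := by
  intro n
  induction n with
  | zero =>
    intro u hu F G hF _ _ _
    have hu0 : u = [] := List.length_eq_zero_iff.mp (Nat.le_zero.mp hu)
    subst hu0
    simp only [List.drop_nil] at hF
    exact absurd (List.prefix_nil.mp hF) hne
  | succ n ih =>
    intro u hu F G hF hFmin hG hGmin
    have htsl : 0 < ts.length := List.length_pos_iff.mpr hne
    -- ts cannot reach past the '>' at relative position G
    have htsG : ts.length ≤ G := by
      by_contra hlt
      push_neg at hlt
      obtain ⟨t, ht⟩ := hG
      have hGlen : G < (u.drop F).length := by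
        by_contra hge
        push_neg at hge
        rw [List.drop_eq_nil_of_le hge] at ht
        simp at ht
      have hgetopt : (u.drop F)[G]? = some '>' := by
        have h1 : ((u.drop F).drop G)[0]? = some '>' := by rw [← ht]; rfl
        rwa [List.getElem?_drop, Nat.add_zero] at h1
      have hget : (u.drop F)[G]'hGlen = '>' := by
        rw [List.getElem?_eq_getElem hGlen] at hgetopt
        exact Option.some_injective _ hgetopt
      have hts_get : ts[G]'hlt = (u.drop F)[G]'hGlen := hF.getElem hlt
      rw [hget] at hts_get
      exact hgt (hts_get ▸ List.getElem_mem hlt)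
    have hmemgt : ['>'] <+: u.drop (F + G) := by
      rwa [List.drop_drop] at hG
    have hginf : ['>'] <:+: u := hmemgt.isInfix.trans (List.drop_suffix _ _).isInfix
    have hg0 : 0 ≤ PySem.Chars.find u ['>'] := (PySem.Chars.find_nonneg_iff u ['>']).mpr hginf
    obtain ⟨hg0pre, hg0min⟩ := PySem.Chars.find_spec hg0
    set G0 := (PySem.Chars.find u ['>']).toNat with hG0def
    have hG0le : G0 ≤ F + G := by
      by_contra hlt
      push_neg at hlt
      exact hg0min (F + G) hlt hmemgt
    by_cases hcmp : F ≤ G0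
    · -- the first '>' of u is exactly A's chosen one: G0 = F + G
      have hG0eq : G0 = F + G := by
        by_contra hne2
        have hlt2 : G0 < F + G := by omega
        have hpp : ['>'] <+: (u.drop F).drop (G0 - F) := by
          rw [List.drop_drop]
          have h1 : F + (G0 - F) = G0 := by omega
          rwa [h1]
        exact hGmin (G0 - F) (by omega) hpp
      rw [hG0eq] at hg0pre hg0min
      have hdecomp := pvSplit1_decomp (F + G) u hg0pre hg0min
      unfold pvB
      rw [hdecomp, List.dropLast_cons_of_ne_nil (pvSplit1_ne_nil _), List.map_cons,
        List.sum_cons]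
      congr 1
      have hocc : ts <+: (u.take (F + G)).drop F := by
        rw [List.drop_take]
        have h1 : F + G - F = G := by omega
        rw [h1]
        exact List.prefix_take_iff.mpr ⟨hF, htsG⟩
      have hoccmin : ∀ i < F, ¬ ts <+: (u.take (F + G)).drop i := by
        intro i hi hpref
        rw [List.drop_take] at hpref
        exact hFmin i hi (List.prefix_take_iff.mp hpref).1
      have hfind : PySem.Chars.find (u.take (F + G)) ts = (F : Int) := by
        have hinf2 : ts <:+: u.take (F + G) :=
          hocc.isInfix.trans (List.drop_suffix _ _).isInfix
        have hr0 : 0 ≤ PySem.Chars.find (u.take (F + G)) ts :=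
          (PySem.Chars.find_nonneg_iff _ _).mpr hinf2
        obtain ⟨hrpre, hrmin⟩ := PySem.Chars.find_spec hr0
        have h1 : ¬ (PySem.Chars.find (u.take (F + G)) ts).toNat < F :=
          fun h => hoccmin _ h hrpre
        have h2 : ¬ F < (PySem.Chars.find (u.take (F + G)) ts).toNat :=
          fun h => hrmin F h hocc
        omega
      simp only [pvScore, hfind]
      rw [if_neg (by omega)]
      have htn : ((F : Int)).toNat = F := by omega
      rw [htn, List.drop_take]
      have h1 : F + G - F = G := by omega
      rw [h1]
    · -- a '>' strictly before A's tag: peel a zero-score chunk and recurse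
      push_neg at hcmp
      have hdecomp := pvSplit1_decomp G0 u hg0pre hg0min
      have hscore0 : pvScore ts attr val (u.take G0) = 0 := by
        have hfind : PySem.Chars.find (u.take G0) ts = -1 := by
          rw [PySem.Chars.find_eq_neg_one_iff]
          intro hinf2
          obtain ⟨j, hj⟩ := (PySem.Chars.exists_prefix_drop_iff_isIn ts (u.take G0)).mpr
            ((PySem.Chars.isIn_iff_infix ts _).mpr hinf2)
          rw [List.drop_take] at hj
          have hj2 := List.prefix_take_iff.mp hj
          have hjlt : j < F := by
            have := hj2.2
            omega
          exact hFmin j hjlt hj2.1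
        simp [pvScore, hfind]
      have hulen : F < u.length := by
        by_contra hle
        push_neg at hle
        rw [List.drop_eq_nil_of_le hle] at hF
        exact hne (List.prefix_nil.mp hF)
      have harg : (u.drop (G0 + 1)).length ≤ n := by
        simp only [List.length_drop]
        omega
      have hdd : (u.drop (G0 + 1)).drop (F - (G0 + 1)) = u.drop F := by
        rw [List.drop_drop]
        congr 1
        omega
      have ihres := ih (u.drop (G0 + 1)) harg (F - (G0 + 1)) G
        (by rw [hdd]; exact hF)
        (by intro i hi hp
            rw [List.drop_drop] at hp
            exact hFmin (G0 + 1 + i) (by omega) hp)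
        (by rw [hdd]; exact hG)
        (by rw [hdd]; exact hGmin)
      unfold pvB at ihres ⊢
      rw [hdecomp, List.dropLast_cons_of_ne_nil (pvSplit1_ne_nil _), List.map_cons,
        List.sum_cons, hscore0, ihres, hdd]
      have h2 : (u.drop (G0 + 1)).drop (F - (G0 + 1) + G + 1) = u.drop (F + G + 1) := by
        rw [List.drop_drop]
        congr 1
        omega
      rw [h2]
      ring

-- A's fueled loop from position k computes the per-chunk sum over the suffix
lemma pvLoopA_eq (html ts attr val : List Char) (hne : ts ≠ []) (hgt : '>' ∉ ts)
    (hpre : ∀ j < html.length, ts <+: html.drop j → '>' ∈ html.drop j) :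
    ∀ (fuel k : Nat), k ≤ html.length → html.length - k < fuel → ∀ count,
    pvLoopA html ts attr val fuel (k : Int) count = count + pvB ts attr val (html.drop k) := by
  intro fuel
  induction fuel with
  | zero => intro k hk hlt count; omega
  | succ fuel ih =>
    intro k hk hlt count
    by_cases hkl : k < html.length
    · by_cases hf : PySem.Chars.find (html.drop k) ts = -1
      · -- no further opening tag: the loop stops, and B scores nothing on the suffix
        have hb0 : pvB ts attr val (html.drop k) = 0 :=
          pvB_eq_zero _ _ _ _ ((PySem.Chars.find_eq_neg_one_iff _ _).mp hf)
        rw [pvLoopA, if_pos (show (k : Int) < (html.length : Int) by exact_mod_cast hkl)]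
        simp [PySem.Chars.findFrom_natCast html ts k hk, hf, hb0]
      · have hf0 : 0 ≤ PySem.Chars.find (html.drop k) ts := by
          have := PySem.Chars.neg_one_le_find (html.drop k) ts
          omega
        obtain ⟨hFpre, hFmin⟩ := PySem.Chars.find_spec hf0
        set F := (PySem.Chars.find (html.drop k) ts).toNat with hFdef
        have hFcast : PySem.Chars.find (html.drop k) ts = (F : Int) := by omega
        have hdd : (html.drop k).drop F = html.drop (k + F) := by rw [List.drop_drop]
        have h1 : ts <+: html.drop (k + F) := hdd ▸ hFpre
        have hqlen : k + F < html.length := by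
          by_contra hge
          push_neg at hge
          rw [List.drop_eq_nil_of_le hge] at h1
          exact hne (List.prefix_nil.mp h1)
        have hmem : '>' ∈ html.drop (k + F) := hpre (k + F) hqlen h1
        have hgne : PySem.Chars.find (html.drop (k + F)) ['>'] ≠ -1 :=
          (PySem.Chars.find_ne_neg_one_iff _ _).mpr ((List.singleton_infix_iff _ _).mpr hmem)
        have hg0 : 0 ≤ PySem.Chars.find (html.drop (k + F)) ['>'] := by
          have := PySem.Chars.neg_one_le_find (html.drop (k + F)) ['>']
          omega
        obtain ⟨hGpre, hGmin⟩ := PySem.Chars.find_spec hg0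
        set G := (PySem.Chars.find (html.drop (k + F)) ['>']).toNat with hGdef
        have hGcast : PySem.Chars.find (html.drop (k + F)) ['>'] = (G : Int) := by omega
        have hplen : k + F + G < html.length := by
          have h2 : ['>'] <+: html.drop (k + F + G) := by
            have := hGpre
            rwa [List.drop_drop] at this
          by_contra hge
          push_neg at hge
          rw [List.drop_eq_nil_of_le hge] at h2
          simp at h2
        have htag : List.take 1 ((html.drop (k + F)).drop G) = ['>'] := by
          obtain ⟨t, ht⟩ := hGpre
          rw [← ht]
          rfl
        have hiter :
            pvLoopA html ts attr val (fuel + 1) (k : Int) count =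
            pvLoopA html ts attr val fuel ((k + F + G + 1 : Nat) : Int)
              (if PySem.Chars.isIn attr ((html.drop (k + F)).take G ++ ['>']) &&
                  PySem.Chars.isIn val ((html.drop (k + F)).take G ++ ['>'])
               then count + 1 else count) := by
          rw [pvLoopA, if_pos (show (k : Int) < (html.length : Int) by exact_mod_cast hkl)]
          simp only [PySem.Chars.findFrom_natCast html ts k hk]
          simp only [if_neg hf]
          simp only [hFcast]
          rw [if_neg (show ¬ ((k : Int) + (F : Int) = -1) by omega)]
          rw [show ((k : Int) + (F : Int)) = ((k + F : Nat) : Int) by push_cast; ring]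
          rw [PySem.Chars.findFrom_natCast html ['>'] (k + F) (by omega)]
          rw [if_neg hgne, hGcast]
          rw [show ((k + F : Nat) : Int) + (G : Int) + 1 = ((k + F + G + 1 : Nat) : Int) by
            push_cast; ring]
          rw [PySem.Chars.slice_eq_listSlice, PySem.List.slice_natCast]
          rw [show k + F + G + 1 - (k + F) = G + 1 by omega]
          rw [List.take_add, htag]
        rw [hiter, ih (k + F + G + 1) (by omega) (by omega) _]
        have hstep := pvChunk_step ts attr val hne hgt (html.drop k).length (html.drop k)
          le_rfl F G hFpre hFmin (by rw [hdd]; exact hGpre) (by rw [hdd]; exact hGmin)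
        rw [hdd] at hstep
        have hdd2 : (html.drop k).drop (F + G + 1) = html.drop (k + F + G + 1) := by
          rw [List.drop_drop]
          congr 1
          omega
        rw [hdd2] at hstep
        rw [hstep]
        by_cases hcond : (PySem.Chars.isIn attr ((html.drop (k + F)).take G ++ ['>']) &&
            PySem.Chars.isIn val ((html.drop (k + F)).take G ++ ['>'])) = true
        · rw [if_pos hcond, if_pos hcond]
          ring
        · rw [if_neg hcond, if_neg hcond]
          ring
    · -- index ≥ len(html): the loop stops; the suffix is empty and B scores nothing
      have hk' : k = html.length := by omega
      subst hk'
      rw [pvLoopA, if_neg (by omega)]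
      rw [List.drop_eq_nil_of_le le_rfl]
      simp [pvB, pvSplit1]

-- ===== VERDICT (by name: the statement is the Claim_ definition above) =====
theorem countTagOccurrences_spec : Claim_equal_countTagOccurrences := by
  intro html tagName attribute_ value _hdom hpre
  unfold Spec_countTagOccurrences countTagOccurrences countTagOccurrences_alt
  obtain ⟨h1, h2⟩ := hpre
  rw [pvSplitOn_eq_split1, PySem.List.slice_to_neg_one, pvChunkCount_eq_sum]
  by_cases hgt' : '>' ∈ tagName.toList
  · -- tagName contains '>' but (by Pre_) '<'+tagName never occurs: both sides count 0
    have hninf : ¬ ('<' :: tagName.toList) <:+: html.toList := fun hinf =>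
      h1 ⟨hgt', (PySem.Chars.isIn_iff_infix _ _).mpr hinf⟩
    have hb := pvB_eq_zero ('<' :: tagName.toList) attribute_.toList value.toList
      html.toList hninf
    unfold pvB at hb
    rw [hb, pvLoopA_notin _ _ _ _ hninf _ _]
  · have hne : ('<' :: tagName.toList) ≠ [] := by simp
    have hgt : '>' ∉ ('<' :: tagName.toList) := by
      simp only [List.mem_cons]
      rintro (h | h)
      · exact absurd h (by decide)
      · exact hgt' h
    have := pvLoopA_eq html.toList ('<' :: tagName.toList) attribute_.toList value.toList
      hne hgt h2 (html.toList.length + 1) 0 (Nat.zero_le _) (by omega) 0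
    simp only [Nat.cast_zero, List.drop_zero] at this
    rw [this]
    simp [pvB]
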